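-- pv_equiv track=rewrite | github.com/PaulPio/CodePath | Week3Class1.py | clean_post
-- ===== SOURCE A (Python) =====
-- def clean_post(post):
--     stack = []
--     # Step 2: Loop through the post
--     for char in post:
--
--         # Step 3 & 4: Check if stack isn't empty AND the cases are exact opposites
--         if len(stack) > 0 and char.swapcase() == stack[-1]:
--             # Step 5: They cancel out! Pop the top character and do nothing else.
--             stack.pop()
--
--         else:
--             # Step 6: No match, so push it onto the stack
--             stack.append(char)
--
--     # Step 7: Join the surviving characters back into a string
--     return "".join(stack)
-- ===== SOURCE B (Python) =====
-- def clean_post(post):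
--     # Fixpoint: repeatedly delete the first adjacent opposite-case pair until none remains.
--     s = post
--     while True:
--         for i in range(1, len(s)):
--             if s[i].swapcase() == s[i - 1]:
--                 s = s[:i - 1] + s[i + 1:]
--                 break
--         else:
--             return s
-- ===== Notes on version B (the rewrite author's own statement) =====
-- stated objective: alternative
-- what changed: Replaces the one-pass stack with an order-independent fixpoint that repeatedly deletes the first adjacent opposite-case pair and rescans until no pair remains (correct by confluence of the cancellation rewrite).
import Mathlib
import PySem

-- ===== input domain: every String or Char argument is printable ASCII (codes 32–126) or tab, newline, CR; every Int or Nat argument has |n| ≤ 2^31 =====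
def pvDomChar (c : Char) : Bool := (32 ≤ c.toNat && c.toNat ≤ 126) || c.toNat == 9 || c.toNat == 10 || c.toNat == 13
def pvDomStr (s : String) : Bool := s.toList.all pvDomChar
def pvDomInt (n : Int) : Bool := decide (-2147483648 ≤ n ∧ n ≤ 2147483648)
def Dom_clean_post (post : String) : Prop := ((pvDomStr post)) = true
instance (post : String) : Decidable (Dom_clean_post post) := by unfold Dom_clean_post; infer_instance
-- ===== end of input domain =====

-- B replaces A's one-pass stack by a fixpoint that repeatedly deletes the first adjacent
-- opposite-case pair and rescans; same result by confluence of the cancellation rewrite.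


-- char.swapcase(): exact for Python's str.swapcase on the ASCII domain (Dom)
def swapChar (c : Char) : Char :=
  if PySem.Chars.islower c then PySem.Chars.upperChar c
  else if PySem.Chars.isupper c then PySem.Chars.lowerChar c else c

-- ===== PORT A =====
-- one loop step: 'if len(stack) > 0 and char.swapcase() == stack[-1]: stack.pop() else: stack.append(char)'
def pushCancel (stack : List Char) (c : Char) : List Char :=
  if 0 < stack.length ∧ some (swapChar c) = stack.getLast? then stack.dropLast
  else stack ++ [c]

def clean_post (post : String) : String :=
  String.ofList (post.toList.foldl pushCancel [])

-- ===== PORT B =====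
-- 'for i in range(1, len(s)): if s[i].swapcase() == s[i-1]: …' — first cancellable index, or none
def findCancel : List Char → Nat → Option Nat
  | a :: b :: rest, i => if swapChar b = a then some i else findCancel (b :: rest) (i + 1)
  | _, _ => none

theorem findCancel_bounds : ∀ (l : List Char) (j i : Nat),
    findCancel l j = some i → j ≤ i ∧ i - j + 2 ≤ l.length := by
  intro l
  induction l with
  | nil => intro j i h; simp [findCancel] at h
  | cons a t ih =>
    intro j i h
    cases t with
    | nil => simp [findCancel] at h
    | cons b r =>
      rw [findCancel] at h
      by_cases hc : swapChar b = a
      · simp [hc] at h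
        subst h
        simp
      · simp [hc] at h
        have := ih (j + 1) i h
        simp at this ⊢
        omega

-- the fixpoint loop: remove s[i-1] and s[i] ('s = s[:i-1] + s[i+1:]', slices in range) and rescan
def cleanLoop (l : List Char) : List Char :=
  match h : findCancel l 1 with
  | some i => cleanLoop (l.take (i - 1) ++ l.drop (i + 1))
  | none => l
termination_by l.length
decreasing_by
  have := findCancel_bounds l 1 i h
  simp
  omega

def clean_post_alt (post : String) : String :=
  String.ofList (cleanLoop post.toList)

-- ===== PRECONDITION & SPEC =====
def Spec_clean_post (post : String) (out : String) : Prop := out = clean_post_alt post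
instance (post : String) (out : String) : Decidable (Spec_clean_post post out) := by unfold Spec_clean_post; infer_instance

-- ===== CLAIM (what is proved, stated in full; the proofs are below) =====
def Claim_equal_clean_post : Prop := ∀ (post : String), Dom_clean_post post → Spec_clean_post post (clean_post post)

-- ===== LEMMAS AND PROOFS =====

theorem char_toNat_ofNat (n : Nat) (h : n < 55296) : (Char.ofNat n).toNat = n := by
  unfold Char.ofNat
  rw [dif_pos (Or.inl h)]
  simp [Char.ofNatAux, Char.toNat]

theorem char_le_iff {a b : Char} : a ≤ b ↔ a.toNat ≤ b.toNat := by
  rw [Char.le_def, UInt32.le_iff_toNat_le]; rfl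

theorem islower_iff (c : Char) : PySem.Chars.islower c = true ↔ 97 ≤ c.toNat ∧ c.toNat ≤ 122 := by
  simp [PySem.Chars.islower, char_le_iff]

theorem isupper_iff (c : Char) : PySem.Chars.isupper c = true ↔ 65 ≤ c.toNat ∧ c.toNat ≤ 90 := by
  simp [PySem.Chars.isupper, char_le_iff]

theorem swap_swap (c : Char) : swapChar (swapChar c) = c := by
  unfold swapChar PySem.Chars.upperChar PySem.Chars.lowerChar
  by_cases hl : PySem.Chars.islower c = true
  · have hb := (islower_iff c).1 hl
    have h1 : (Char.ofNat (c.toNat - 32)).toNat = c.toNat - 32 := char_toNat_ofNat _ (by omega)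
    have hu : PySem.Chars.isupper (Char.ofNat (c.toNat - 32)) = true := by
      rw [isupper_iff, h1]; omega
    have hnl : ¬ PySem.Chars.islower (Char.ofNat (c.toNat - 32)) = true := by
      rw [islower_iff, h1]; omega
    simp [hl, hu, hnl, h1]
    have : c.toNat - 32 + 32 = c.toNat := by omega
    rw [this, Char.ofNat_toNat]
  · by_cases hu : PySem.Chars.isupper c = true
    · have hb := (isupper_iff c).1 hu
      have h1 : (Char.ofNat (c.toNat + 32)).toNat = c.toNat + 32 := char_toNat_ofNat _ (by omega)
      have hl2 : PySem.Chars.islower (Char.ofNat (c.toNat + 32)) = true := by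
        rw [islower_iff, h1]; omega
      simp [hl, hu, hl2, h1, Char.ofNat_toNat]
    · simp [hl, hu]

-- a list with no adjacent cancellable pair ("reduced word")
def Reduced (l : List Char) : Prop := List.IsChain (fun a b => swapChar b ≠ a) l

theorem run_reduced : ∀ (l S : List Char), Reduced (S ++ l) → List.foldl pushCancel S l = S ++ l := by
  intro l
  induction l with
  | nil => intro S _; simp
  | cons c cs ih =>
    intro S h
    have hstep : pushCancel S c = S ++ [c] := by
      unfold pushCancel
      rcases List.isChain_append.1 h with ⟨_, _, hjoin⟩
      cases hS : S.getLast? with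
      | none =>
        have : S = [] := by simpa using hS
        simp [this]
      | some a =>
        have hra : swapChar c ≠ a := hjoin a hS c (by simp)
        have hne : ¬ (0 < S.length ∧ some (swapChar c) = some a) := by
          rintro ⟨_, he⟩
          exact hra (Option.some_inj.1 he)
        rw [if_neg hne]
    rw [List.foldl_cons, hstep]
    have := ih (S ++ [c]) (by simpa using h)
    simpa using this

theorem reduced_push (S : List Char) (c : Char) (h : Reduced S) : Reduced (pushCancel S c) := by
  unfold pushCancel
  split
  · exact List.IsChain.prefix h (List.dropLast_prefix S)
  · next hng =>
    apply List.isChain_append.2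
    refine ⟨h, List.isChain_singleton c, ?_⟩
    intro a ha y hy
    simp at hy; subst hy
    intro he
    cases hS : S with
    | nil => simp [hS] at ha
    | cons _ _ =>
      apply hng
      constructor
      · simp [hS]
      · rw [← he] at ha; exact ha.symm

theorem reduced_foldl : ∀ (u S : List Char), Reduced S → Reduced (List.foldl pushCancel S u) := by
  intro u
  induction u with
  | nil => intro S h; simpa using h
  | cons c cs ih => intro S h; exact ih _ (reduced_push S c h)

theorem cancel_two (S : List Char) (x y : Char) (v : List Char)
    (hS : Reduced S) (hxy : swapChar y = x) :
    List.foldl pushCancel S (x :: y :: v) = List.foldl pushCancel S v := by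
  have hyx : y = swapChar x := by rw [← hxy, swap_swap]
  suffices h2 : pushCancel (pushCancel S x) y = S by
    simp only [List.foldl_cons, h2]
  by_cases hg : 0 < S.length ∧ some (swapChar x) = S.getLast?
  · -- x cancels the top of S
    obtain ⟨hlen, hlast⟩ := hg
    have hSne : S ≠ [] := by intro h; subst h; simp at hlen
    have hSdec : S.dropLast ++ [swapChar x] = S := by
      have h1 := List.dropLast_concat_getLast hSne
      rw [List.getLast?_eq_some_getLast hSne] at hlast
      rw [Option.some_inj] at hlast
      rw [hlast]; exact h1
    have h1 : pushCancel S x = S.dropLast := by unfold pushCancel; rw [if_pos ⟨hlen, hlast⟩]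
    rw [h1]
    have hnot : ¬ (0 < S.dropLast.length ∧ some (swapChar y) = S.dropLast.getLast?) := by
      rintro ⟨hdl, hdlast⟩
      -- S would end with [x, swapChar x], contradicting Reduced S
      have hdne : S.dropLast ≠ [] := by intro h; rw [h] at hdl; simp at hdl
      have hdec2 : S.dropLast.dropLast ++ [swapChar y] = S.dropLast := by
        have h2 := List.dropLast_concat_getLast hdne
        rw [List.getLast?_eq_some_getLast hdne, Option.some_inj] at hdlast
        rw [hdlast]; exact h2
      have hSfull : S.dropLast.dropLast ++ [x, swapChar x] = S := by
        rw [← hSdec, ← hdec2, hxy]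
        simp
      rw [← hSfull] at hS
      rcases List.isChain_append.1 hS with ⟨_, hpair, _⟩
      rcases List.isChain_cons.1 hpair with ⟨hr, _⟩
      exact hr (swapChar x) rfl (swap_swap x)
    unfold pushCancel
    rw [if_neg hnot, hyx, hSdec]
  · have h1 : pushCancel S x = S ++ [x] := by unfold pushCancel; rw [if_neg hg]
    rw [h1]
    unfold pushCancel
    rw [if_pos ⟨by simp, by simp [hxy]⟩]
    simp

theorem findCancel_none_reduced : ∀ (l : List Char) (j : Nat),
    findCancel l j = none → Reduced l := by
  intro l
  induction l with
  | nil => intro _ _; exact List.isChain_nil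
  | cons a t ih =>
    intro j h
    cases t with
    | nil => exact List.isChain_singleton a
    | cons b r =>
      rw [findCancel] at h
      by_cases hc : swapChar b = a
      · simp [hc] at h
      · simp [hc] at h
        apply List.isChain_cons.2
        refine ⟨?_, ih (j + 1) h⟩
        intro z hz
        simp at hz
        subst hz
        exact hc

theorem findCancel_split : ∀ (l : List Char) (j i : Nat),
    findCancel l j = some i →
    ∃ u x y v, l = u ++ x :: y :: v ∧ swapChar y = x ∧ u.length = i - j ∧ j ≤ i := by
  intro l
  induction l with
  | nil => intro j i h; simp [findCancel] at h
  | cons a t ih =>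
    intro j i h
    cases t with
    | nil => simp [findCancel] at h
    | cons b r =>
      rw [findCancel] at h
      by_cases hc : swapChar b = a
      · simp [hc] at h
        exact ⟨[], a, b, r, by simp, hc, by simp; omega, by omega⟩
      · simp [hc] at h
        obtain ⟨u, x, y, v, hl, hs, hu, hj⟩ := ih (j + 1) i h
        refine ⟨a :: u, x, y, v, by simp [hl], hs, ?_, by omega⟩
        simp [hu]; omega

theorem main_aux : ∀ (n : Nat) (l : List Char), l.length ≤ n →
    List.foldl pushCancel [] l = cleanLoop l := by
  intro n
  induction n with
  | zero =>
    intro l hl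
    have : l = [] := by cases l with | nil => rfl | cons _ _ => simp at hl
    subst this
    simp [cleanLoop, findCancel]
  | succ n ih =>
    intro l hl
    rw [cleanLoop]
    split
    · next i hfind =>
      obtain ⟨u, x, y, v, hdec, hs, hu, hj⟩ := findCancel_split l 1 i hfind
      have hu1 : u.length = i - 1 := hu
      have htake : l.take (i - 1) = u := by
        rw [hdec, List.take_left' hu1]
      have hdrop : l.drop (i + 1) = v := by
        have hdec2 : l = (u ++ [x, y]) ++ v := by simp [hdec]
        have hlen2 : (u ++ [x, y]).length = i + 1 := by simp [hu1]; omega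
        rw [hdec2, List.drop_left' hlen2]
      rw [htake, hdrop]
      have hred : Reduced (List.foldl pushCancel [] u) :=
        reduced_foldl u [] List.isChain_nil
      calc List.foldl pushCancel [] l
          = List.foldl pushCancel (List.foldl pushCancel [] u) (x :: y :: v) := by
            rw [hdec, List.foldl_append]
        _ = List.foldl pushCancel (List.foldl pushCancel [] u) v :=
            cancel_two _ x y v hred hs
        _ = List.foldl pushCancel [] (u ++ v) := by rw [List.foldl_append]
        _ = cleanLoop (u ++ v) := by
            apply ih
            have : l.length = u.length + v.length + 2 := by simp [hdec]; omega
            simp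
            omega
    · next hfind =>
      have := run_reduced l [] (by simpa using findCancel_none_reduced l 1 hfind)
      simpa using this

-- ===== VERDICT (by name: the statement is the Claim_ definition above) =====
theorem clean_post_spec : Claim_equal_clean_post := by
  intro post _
  unfold Spec_clean_post clean_post clean_post_alt
  rw [main_aux post.toList.length post.toList (le_refl _)]
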